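-- pv_equiv track=rewrite | github.com/neochiu1004/water | app/services.py | current_time_block
-- ===== SOURCE A (Python) =====
-- def current_time_block(blocks: list[dict]) -> dict:
--     for block in blocks:
--         if block["status"] == "current":
--             return block
--     for block in blocks:
--         if block["status"] == "upcoming":
--             return block
--     return blocks[-1]
-- ===== SOURCE B (Python) =====
-- def current_time_block(blocks: list[dict]) -> dict:
--     # Stable argmin over a priority ranking: current=0, upcoming=1, other=2.
--     # min() is stable, so it yields the FIRST block of minimal rank; if even the
--     # minimum is rank 2 (no current/upcoming block), fall back to blocks[-1].
--     rank = {"current": 0, "upcoming": 1}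
--     best = min(blocks, key=lambda b: rank.get(b["status"], 2))
--     if rank.get(best["status"], 2) < 2:
--         return best
--     return blocks[-1]
-- ===== Notes on version B (the rewrite author's own statement) =====
-- stated objective: alternative
-- what changed: B replaces A's two sequential find-scans with a single stable argmin over a priority ranking (current=0, upcoming=1, other=2), returning the rank-minimal block, or the last block when the minimal rank is 2.
-- outside the precondition, e.g. on current_time_block([{'status': 'current'}, {}]): A returns {'status': 'current'}, B raises KeyError
import Mathlib
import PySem

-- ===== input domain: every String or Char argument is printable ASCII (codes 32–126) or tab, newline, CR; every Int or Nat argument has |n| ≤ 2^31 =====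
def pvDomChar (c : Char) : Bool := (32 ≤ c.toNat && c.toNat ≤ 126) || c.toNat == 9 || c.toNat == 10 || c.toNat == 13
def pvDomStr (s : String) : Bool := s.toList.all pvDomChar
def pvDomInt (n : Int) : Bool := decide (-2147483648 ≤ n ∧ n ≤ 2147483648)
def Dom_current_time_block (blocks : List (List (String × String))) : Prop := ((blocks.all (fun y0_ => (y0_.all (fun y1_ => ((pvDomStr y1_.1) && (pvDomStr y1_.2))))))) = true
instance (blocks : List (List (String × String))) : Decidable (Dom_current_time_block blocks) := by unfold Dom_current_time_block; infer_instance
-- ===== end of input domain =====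

-- B replaces A's two find-scans with a single stable argmin over a priority ranking (current=0, upcoming=1, other=2); alternative decomposition, same cost.


-- ===== PORT A =====
-- A: first loop returns the first block whose "status" is "current"; second loop
-- the first whose "status" is "upcoming"; else blocks[-1].  block["status"] is a
-- dict lookup; on Pre_ the key is always present where it is read, so getD "" is exact there.
def pvFindA (st : String) (bs : List (List (String × String))) : Option (List (String × String)) :=
  match bs with
  | [] => none
  | b :: rest => if PySem.Dict.getD (PySem.Dict.mk b) "status" "" == st then some b else pvFindA st rest

def current_time_block (blocks : List (List (String × String))) : List (String × String) :=
  match pvFindA "current" blocks with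
  | some b => b
  | none =>
    match pvFindA "upcoming" blocks with
    | some b => b
    | none => blocks.getLast?.getD []   -- blocks[-1]; Pre_ guarantees blocks ≠ []

-- ===== PORT B =====
-- B: rank.get(b["status"], 2) — current ↦ 0, upcoming ↦ 1, anything else ↦ 2.
-- On Pre_ every block has a "status" key, so getD "" is exact for b["status"].
def pvRank (b : List (String × String)) : Nat :=
  if PySem.Dict.getD (PySem.Dict.mk b) "status" "" == "current" then 0
  else if PySem.Dict.getD (PySem.Dict.mk b) "status" "" == "upcoming" then 1 else 2

-- Python's min(blocks, key=…) is stable: ported as a left fold keeping the first minimal element.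
def current_time_block_alt (blocks : List (List (String × String))) : List (String × String) :=
  match blocks with
  | [] => []   -- min([]) raises ValueError; outside Pre_
  | h :: t =>
    let best := t.foldl (fun best b => if pvRank b < pvRank best then b else best) h
    if pvRank best < 2 then best else blocks.getLast?.getD []

-- ===== PRECONDITION & SPEC =====
-- Pre_ excludes the inputs on which a Python side raises: the empty list (A: IndexError, B:
-- ValueError) and lists with a block lacking a "status" key — there A's lazy scan raises KeyError
-- unless a "current" block precedes the malformed one, while B's argmin inspects every block's
-- b["status"] and always raises KeyError.
def pvHasStatus (b : List (String × String)) : Bool :=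
  (PySem.Dict.get? (PySem.Dict.mk b) "status").isSome

def Pre_current_time_block (blocks : List (List (String × String))) : Prop :=
  blocks ≠ [] ∧ blocks.all pvHasStatus = true
instance (blocks : List (List (String × String))) : Decidable (Pre_current_time_block blocks) := by
  unfold Pre_current_time_block; infer_instance

def pvWitness_current_time_block : (List (List (String × String))) :=
  [[("status", "done")], [("status", "upcoming")], [("status", "current")]]

def Spec_current_time_block (blocks : List (List (String × String))) (out : List (String × String)) : Prop := out = current_time_block_alt blocks
instance (blocks : List (List (String × String))) (out : List (String × String)) : Decidable (Spec_current_time_block blocks out) := by unfold Spec_current_time_block; infer_instance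

-- ===== CLAIM (what is proved, stated in full; the proofs are below) =====
def Claim_equal_current_time_block : Prop := ∀ (blocks : List (List (String × String))), Dom_current_time_block blocks → Pre_current_time_block blocks → Spec_current_time_block blocks (current_time_block blocks)

-- ===== LEMMAS AND PROOFS =====
theorem pvRank_eq_zero_iff (b : List (String × String)) :
    pvRank b = 0 ↔ PySem.Dict.getD (PySem.Dict.mk b) "status" "" = "current" := by
  unfold pvRank; split_ifs <;> simp_all

theorem pvRank_eq_one_iff (b : List (String × String)) :
    pvRank b = 1 ↔ PySem.Dict.getD (PySem.Dict.mk b) "status" "" = "upcoming" := by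
  unfold pvRank; split_ifs <;> simp_all

theorem pvRank_cases (b : List (String × String)) : pvRank b = 0 ∨ pvRank b = 1 ∨ pvRank b = 2 := by
  unfold pvRank; split_ifs <;> simp

-- Characterisation of the stable-argmin fold in terms of A's two scans.
theorem pvFold_eq (t : List (List (String × String))) (best : List (String × String)) :
    t.foldl (fun best b => if pvRank b < pvRank best then b else best) best =
      if pvRank best = 0 then best
      else match pvFindA "current" t with
        | some b => b
        | none =>
          if pvRank best = 1 then best
          else match pvFindA "upcoming" t with
            | some b => b
            | none => best := by
  induction t generalizing best with
  | nil => rcases pvRank_cases best with h | h | h <;> simp [pvFindA, h]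
  | cons b rest ih =>
    simp only [List.foldl_cons, pvFindA]
    have k0 := pvRank_eq_zero_iff b
    have k1 := pvRank_eq_one_iff b
    have k0' := pvRank_eq_zero_iff best
    have k1' := pvRank_eq_one_iff best
    rcases pvRank_cases best with hb | hb | hb <;>
      rcases pvRank_cases b with hc | hc | hc <;>
      simp_all [ih]

theorem pvFindA_rank_zero {t : List (List (String × String))} {b : List (String × String)}
    (h : pvFindA "current" t = some b) : pvRank b = 0 := by
  induction t with
  | nil => simp [pvFindA] at h
  | cons c rest ih =>
    simp only [pvFindA] at h
    split_ifs at h with hc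
    · cases h; exact (pvRank_eq_zero_iff _).mpr (by simpa using hc)
    · exact ih h

theorem pvFindA_rank_one {t : List (List (String × String))} {b : List (String × String)}
    (h : pvFindA "upcoming" t = some b) : pvRank b = 1 := by
  induction t with
  | nil => simp [pvFindA] at h
  | cons c rest ih =>
    simp only [pvFindA] at h
    split_ifs at h with hc
    · cases h; exact (pvRank_eq_one_iff _).mpr (by simpa using hc)
    · exact ih h

-- ===== VERDICT (by name: the statement is the Claim_ definition above) =====
theorem current_time_block_spec : Claim_equal_current_time_block := by
  intro blocks _ _
  unfold Spec_current_time_block current_time_block current_time_block_alt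
  cases blocks with
  | nil => simp [pvFindA]
  | cons h t =>
    simp only [pvFold_eq]
    rcases pvRank_cases h with hh | hh | hh
    · have hc := (pvRank_eq_zero_iff h).mp hh
      simp [pvFindA, hc, hh]
    · have hu := (pvRank_eq_one_iff h).mp hh
      have hnc : PySem.Dict.getD (PySem.Dict.mk h) "status" "" ≠ "current" := by
        intro hc; have := (pvRank_eq_zero_iff h).mpr hc; omega
      cases hcur : pvFindA "current" t with
      | some b =>
        have := pvFindA_rank_zero hcur
        simp [pvFindA, hnc, hcur, hh, this]
      | none => simp [pvFindA, hnc, hcur, hh, hu]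
    · have hnc : PySem.Dict.getD (PySem.Dict.mk h) "status" "" ≠ "current" := by
        intro hc; have := (pvRank_eq_zero_iff h).mpr hc; omega
      have hnu : PySem.Dict.getD (PySem.Dict.mk h) "status" "" ≠ "upcoming" := by
        intro hc; have := (pvRank_eq_one_iff h).mpr hc; omega
      cases hcur : pvFindA "current" t with
      | some b =>
        have := pvFindA_rank_zero hcur
        simp [pvFindA, hnc, hcur, hh, this]
      | none =>
        cases hup : pvFindA "upcoming" t with
        | some b =>
          have := pvFindA_rank_one hup
          simp [pvFindA, hnc, hnu, hcur, hup, hh, this]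
        | none => simp [pvFindA, hnc, hnu, hcur, hup, hh]
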